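-- pv_equiv track=rewrite | github.com/Momomokri/Unit-Testing-and-Cryptography | Part 2 - Summative/2.2 Affine Cipher/main.py | convert_to_num
-- ===== SOURCE A (Python) =====
-- alpha = "ABCDEFGHIJKLMNOPQRSTUVWXYZ"
--
-- def convert_to_num(ngram):
--     """
--     Converts a text into a number.
--     :param ngram: The text to convert.
--     :return: A number based on the input text.
--     """
--     num = 0
--     for i in range(len(ngram)):
--         if ngram[i] not in alpha:
--             continue
--         else:
--             num += alpha.find(ngram[i]) * (26**i)
--     return num
-- ===== SOURCE B (Python) =====
-- alpha = "ABCDEFGHIJKLMNOPQRSTUVWXYZ"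
--
-- def convert_to_num(ngram):
--     """
--     Converts a text into a number.
--     :param ngram: The text to convert.
--     :return: A number based on the input text.
--     """
--     num = 0
--     for ch in reversed(ngram):
--         num *= 26
--         if ch in alpha:
--             num += alpha.find(ch)
--     return num
-- ===== Notes on version B (the rewrite author's own statement) =====
-- stated objective: idiomatic
-- what changed: Replaces the index-based range loop computing 26**i per position with Horner's method over the reversed string (num = num*26, plus the letter value when present), eliminating the explicit power and indexing.
import Mathlib
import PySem

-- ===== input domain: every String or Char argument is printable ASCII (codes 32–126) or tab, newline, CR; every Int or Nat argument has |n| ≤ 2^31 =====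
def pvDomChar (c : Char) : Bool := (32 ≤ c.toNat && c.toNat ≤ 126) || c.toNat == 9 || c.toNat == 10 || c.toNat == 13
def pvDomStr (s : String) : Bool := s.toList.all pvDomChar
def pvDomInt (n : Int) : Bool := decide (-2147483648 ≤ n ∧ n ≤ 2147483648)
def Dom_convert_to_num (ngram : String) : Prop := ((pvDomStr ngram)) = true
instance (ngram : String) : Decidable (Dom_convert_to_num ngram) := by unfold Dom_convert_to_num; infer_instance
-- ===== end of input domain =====

-- B replaces the index-based loop with 26**i powers by Horner's method over the reversed string (idiomatic; same result).


-- ===== PORT A =====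
def pvAlpha : List Char := "ABCDEFGHIJKLMNOPQRSTUVWXYZ".toList

-- for i in range(len(ngram)): if ngram[i] not in alpha: continue else: num += alpha.find(ngram[i]) * 26**i
def convert_to_num (ngram : String) : Int :=
  (PySem.List.pyRange 0 (PySem.Str.len ngram) 1).foldl
    (fun num i =>
      match PySem.Str.pyGet? ngram i with
      | none => num        -- unreachable: i ranges over valid indices
      | some c =>
        if ¬ (PySem.Chars.isIn [c] pvAlpha) then num
        else num + PySem.Chars.find pvAlpha [c] * 26 ^ i.toNat)
    0

-- ===== PORT B =====
-- num = 0; for ch in reversed(ngram): num *= 26; if ch in alpha: num += alpha.find(ch)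
def convert_to_num_alt (ngram : String) : Int :=
  ngram.toList.reverse.foldl
    (fun num ch =>
      let num := num * 26
      if PySem.Chars.isIn [ch] pvAlpha then num + PySem.Chars.find pvAlpha [ch] else num)
    0

-- ===== PRECONDITION & SPEC =====
def Spec_convert_to_num (ngram : String) (out : Int) : Prop := out = convert_to_num_alt ngram
instance (ngram : String) (out : Int) : Decidable (Spec_convert_to_num ngram out) := by unfold Spec_convert_to_num; infer_instance

-- ===== CLAIM (what is proved, stated in full; the proofs are below) =====
def Claim_equal_convert_to_num : Prop := ∀ (ngram : String), Dom_convert_to_num ngram → Spec_convert_to_num ngram (convert_to_num ngram)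

-- ===== LEMMAS AND PROOFS =====

-- value a single character contributes (0 for a non-letter)
def pvVal (c : Char) : Int :=
  if PySem.Chars.isIn [c] pvAlpha then PySem.Chars.find pvAlpha [c] else 0

-- little-endian base-26 value of a character list
def pvS : List Char → Int
  | [] => 0
  | c :: t => pvVal c + 26 * pvS t

theorem pvS_append_singleton (xs : List Char) (x : Char) :
    pvS (xs ++ [x]) = pvS xs + pvVal x * 26 ^ xs.length := by
  induction xs with
  | nil => simp [pvS]
  | cons c t ih => simp [pvS, ih, pow_succ]; ring

-- A's loop on a character list, reverse induction
theorem pvA_list (xs : List Char) :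
    (PySem.List.pyRange 0 (xs.length : Int) 1).foldl
      (fun num i =>
        match PySem.List.pyGet? xs i with
        | none => num
        | some c =>
          if ¬ (PySem.Chars.isIn [c] pvAlpha) then num
          else num + PySem.Chars.find pvAlpha [c] * 26 ^ i.toNat) 0 = pvS xs := by
  induction xs using List.reverseRecOn with
  | nil => simp [PySem.List.pyRange_one_eq_nil, pvS]
  | append_singleton xs x ih =>
    rw [List.length_append, List.length_singleton,
      show ((xs.length + 1 : Nat) : Int) = (xs.length : Int) + 1 by push_cast; ring,
      PySem.List.pyRange_one_succ_right (by positivity), List.foldl_append]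
    have hcongr := PySem.List.foldl_congr_mem (l := PySem.List.pyRange 0 (xs.length : Int) 1)
      (init := (0 : Int))
      (f := fun num i =>
        match PySem.List.pyGet? (xs ++ [x]) i with
        | none => num
        | some c =>
          if ¬ (PySem.Chars.isIn [c] pvAlpha) then num
          else num + PySem.Chars.find pvAlpha [c] * 26 ^ i.toNat)
      (g := fun num i =>
        match PySem.List.pyGet? xs i with
        | none => num
        | some c =>
          if ¬ (PySem.Chars.isIn [c] pvAlpha) then num
          else num + PySem.Chars.find pvAlpha [c] * 26 ^ i.toNat)
      (by
        intro acc i hi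
        rw [PySem.List.mem_pyRange_one] at hi
        dsimp only
        rw [PySem.List.pyGet?_of_nonneg _ hi.1, PySem.List.pyGet?_of_nonneg _ hi.1,
          List.getElem?_append_left (by omega : i.toNat < xs.length)])
    rw [hcongr, ih, pvS_append_singleton]
    have hx : PySem.List.pyGet? (xs ++ [x]) (xs.length : Int) = some x := by
      rw [PySem.List.pyGet?_of_nonneg _ (by positivity)]
      simp
    rw [List.foldl_cons, List.foldl_nil, hx]
    simp only [pvVal, Int.toNat_natCast]
    split_ifs with h <;> ring

-- A on a string reduces to the list lemma
theorem convert_to_num_eq_pvS (ngram : String) : convert_to_num ngram = pvS ngram.toList := by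
  unfold convert_to_num
  rw [PySem.Str.len_eq]
  simp only [PySem.Str.pyGet?_eq, PySem.Chars.pyGet?]
  exact pvA_list ngram.toList

-- B's loop is Horner's scheme; foldl over the reverse is the foldr reading
theorem convert_to_num_alt_eq_pvS (ngram : String) : convert_to_num_alt ngram = pvS ngram.toList := by
  unfold convert_to_num_alt
  rw [List.foldl_reverse]
  induction ngram.toList with
  | nil => simp [pvS]
  | cons c t ih =>
    rw [List.foldr_cons, ih]
    simp only [pvS, pvVal]
    split_ifs with h <;> ring

-- ===== VERDICT (by name: the statement is the Claim_ definition above) =====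
theorem convert_to_num_spec : Claim_equal_convert_to_num := by
  intro ngram _
  unfold Spec_convert_to_num
  rw [convert_to_num_eq_pvS, convert_to_num_alt_eq_pvS]
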